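-- pv_equiv track=rewrite | github.com/AbboudyGeagea/RAYD-Statapp | utils/logger.py | _resolve_folder
-- ===== SOURCE A (Python) =====
-- _MODULE_FOLDER_MAP: dict = {
--     # Dashboard
--     "routes.viewer_controller":        "dashboard",
--     "routes.er_dashboard":             "dashboard",
--     # Reports
--     "routes.report_22":                "reports",
--     "routes.report_23":                "reports",
--     "routes.report_25":                "reports",
--     "routes.report_27":                "reports",
--     "routes.report_29":                "reports",
--     "routes.super_report":             "reports",
--     # ORU / NLP
--     "routes.oru_analytics":            "oru",
--     "nlp_worker":                      "oru",
--     # HL7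
--     "routes.hl7_orders_route":         "hl7",
--     "hl7_listener":                    "hl7",
--     # AI
--     "routes.bitnet_service":           "ai",
--     "routes.ai_teaching":              "ai",
--     # Financial
--     "routes.financial_dashboard":      "financial",
--     # Mapping / config
--     "routes.mapping_controller":       "mapping",
--     # Admin / user management
--     "routes.admin":                    "admin",
--     "routes.user_management":          "admin",
--     "routes.activity_log":             "admin",
--     "routes.scheduling":               "admin",
--     "routes.hl7_forward":              "admin",
--     # DB Manager
--     "routes.db_manager":               "db_manager",
--     # Live feed
--     "routes.live_feed":                "live_feed",
--     # Patient portal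
--     "routes.portal":                   "portal",
--     # Referring intel
--     "routes.referring_intel":          "referring_intel",
--     # ETL (prefix match catches all sub-modules)
--     "ETL_JOBS":                        "etl",
--     # Auth
--     "auth":                            "auth",
--     # Core app (catch-all)
--     "routes.report_cache":             "app",
--     "db":                              "app",
--     "app":                             "app",
--     "APP":                             "app",
--     "config":                          "app",
--     "utils":                           "app",
-- }
--
-- def _resolve_folder(name: str) -> str:
--     """Map a logger name (usually __name__) to a sidebar-tab folder."""
--     if name in _MODULE_FOLDER_MAP:
--         return _MODULE_FOLDER_MAP[name]
--     best_len, folder = 0, "app"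
--     for prefix, f in _MODULE_FOLDER_MAP.items():
--         if (name == prefix or name.startswith(prefix + ".")) and len(prefix) > best_len:
--             best_len, folder = len(prefix), f
--     return folder
-- ===== SOURCE B (Python) =====
-- # B: single left-to-right character scan over name, keeping a running segment path
-- # looked up in a dict keyed by segment tuples, instead of A's linear scan over all
-- # dotted map keys with startswith and a max-length tracker.
-- _FOLDER_BY_PATH: dict = {
--     ("routes", "viewer_controller"):   "dashboard",
--     ("routes", "er_dashboard"):        "dashboard",
--     ("routes", "report_22"):           "reports",
--     ("routes", "report_23"):           "reports",
--     ("routes", "report_25"):           "reports",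
--     ("routes", "report_27"):           "reports",
--     ("routes", "report_29"):           "reports",
--     ("routes", "super_report"):        "reports",
--     ("routes", "oru_analytics"):       "oru",
--     ("nlp_worker",):                   "oru",
--     ("routes", "hl7_orders_route"):    "hl7",
--     ("hl7_listener",):                 "hl7",
--     ("routes", "bitnet_service"):      "ai",
--     ("routes", "ai_teaching"):         "ai",
--     ("routes", "financial_dashboard"): "financial",
--     ("routes", "mapping_controller"):  "mapping",
--     ("routes", "admin"):               "admin",
--     ("routes", "user_management"):     "admin",
--     ("routes", "activity_log"):        "admin",
--     ("routes", "scheduling"):          "admin",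
--     ("routes", "hl7_forward"):         "admin",
--     ("routes", "db_manager"):          "db_manager",
--     ("routes", "live_feed"):           "live_feed",
--     ("routes", "portal"):              "portal",
--     ("routes", "referring_intel"):     "referring_intel",
--     ("ETL_JOBS",):                     "etl",
--     ("auth",):                         "auth",
--     ("routes", "report_cache"):        "app",
--     ("db",):                           "app",
--     ("app",):                          "app",
--     ("APP",):                          "app",
--     ("config",):                       "app",
--     ("utils",):                        "app",
-- }
--
-- def _resolve_folder(name: str) -> str:
--     """Map a logger name (usually __name__) to a sidebar-tab folder."""
--     folder = "app"
--     path, seg = (), ""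
--     for ch in name:
--         if ch == ".":
--             path += (seg,)
--             seg = ""
--             if path in _FOLDER_BY_PATH:
--                 folder = _FOLDER_BY_PATH[path]
--         else:
--             seg += ch
--     path += (seg,)
--     if path in _FOLDER_BY_PATH:
--         folder = _FOLDER_BY_PATH[path]
--     return folder
-- ===== Notes on version B (the rewrite author's own statement) =====
-- stated objective: alternative
-- what changed: B replaces A's linear scan over all dotted map keys (startswith tests plus a max-length tracker) with a single left-to-right character scan of the name that builds the running segment path and looks it up in a table keyed by segment tuples, keeping the deepest hit.
import Mathlib
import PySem

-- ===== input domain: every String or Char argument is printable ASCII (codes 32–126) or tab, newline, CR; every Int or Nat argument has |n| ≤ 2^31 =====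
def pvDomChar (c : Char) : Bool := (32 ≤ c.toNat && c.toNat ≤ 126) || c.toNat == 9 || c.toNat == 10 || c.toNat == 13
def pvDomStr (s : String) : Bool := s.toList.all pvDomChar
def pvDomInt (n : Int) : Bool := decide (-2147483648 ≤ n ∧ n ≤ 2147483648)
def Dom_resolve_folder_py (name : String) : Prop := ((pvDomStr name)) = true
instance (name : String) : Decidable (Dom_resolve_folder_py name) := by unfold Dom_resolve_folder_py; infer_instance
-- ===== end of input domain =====

-- B replaces A's linear scan over all dotted map keys (startswith + max-length tracker)
-- by a single left-to-right character scan that builds the running segment path and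
-- looks it up in a table keyed by segment tuples; objective: alternative.

-- ===== PORT A =====
-- _MODULE_FOLDER_MAP as A uses it: dotted module names (char lists) to folders
def pvMap : List (List Char × String) :=
  [("routes.viewer_controller".toList, "dashboard"),
   ("routes.er_dashboard".toList,      "dashboard"),
   ("routes.report_22".toList,         "reports"),
   ("routes.report_23".toList,         "reports"),
   ("routes.report_25".toList,         "reports"),
   ("routes.report_27".toList,         "reports"),
   ("routes.report_29".toList,         "reports"),
   ("routes.super_report".toList,      "reports"),
   ("routes.oru_analytics".toList,     "oru"),
   ("nlp_worker".toList,               "oru"),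
   ("routes.hl7_orders_route".toList,  "hl7"),
   ("hl7_listener".toList,             "hl7"),
   ("routes.bitnet_service".toList,    "ai"),
   ("routes.ai_teaching".toList,       "ai"),
   ("routes.financial_dashboard".toList, "financial"),
   ("routes.mapping_controller".toList, "mapping"),
   ("routes.admin".toList,             "admin"),
   ("routes.user_management".toList,   "admin"),
   ("routes.activity_log".toList,      "admin"),
   ("routes.scheduling".toList,        "admin"),
   ("routes.hl7_forward".toList,       "admin"),
   ("routes.db_manager".toList,        "db_manager"),
   ("routes.live_feed".toList,         "live_feed"),
   ("routes.portal".toList,            "portal"),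
   ("routes.referring_intel".toList,   "referring_intel"),
   ("ETL_JOBS".toList,                 "etl"),
   ("auth".toList,                     "auth"),
   ("routes.report_cache".toList,      "app"),
   ("db".toList,                       "app"),
   ("app".toList,                      "app"),
   ("APP".toList,                      "app"),
   ("config".toList,                   "app"),
   ("utils".toList,                    "app")]

-- dict membership + indexing ('name in d' / 'd[name]'): first (unique) matching key
def pvGet (cs : List Char) (L : List (List Char × String)) : Option String :=
  match L with
  | [] => none
  | (k, v) :: t => if cs == k then some v else pvGet cs t

-- one step of A's 'for prefix, f in _MODULE_FOLDER_MAP.items()' loop over state (best_len, folder)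
def pvStep (cs : List Char) (st : Int × String) (kv : List Char × String) : Int × String :=
  if (cs == kv.1 || PySem.Chars.startswith cs (kv.1 ++ ['.'])) && decide (st.1 < (kv.1.length : Int))
  then ((kv.1.length : Int), kv.2) else st

-- A's scan: best_len, folder = 0, "app"; loop; return folder
def pvScan (cs : List Char) : String := (pvMap.foldl (pvStep cs) (0, "app")).2

def resolve_folder_py (name : String) : String :=
  match pvGet name.toList pvMap with   -- if name in _MODULE_FOLDER_MAP: return _MODULE_FOLDER_MAP[name]
  | some v => v
  | none => pvScan name.toList

-- ===== PORT B =====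
-- _FOLDER_BY_PATH: the same folders keyed by tuples of dot-free segments
def pvTbl : List (List (List Char) × String) :=
  [(["routes".toList, "viewer_controller".toList],   "dashboard"),
   (["routes".toList, "er_dashboard".toList],        "dashboard"),
   (["routes".toList, "report_22".toList],           "reports"),
   (["routes".toList, "report_23".toList],           "reports"),
   (["routes".toList, "report_25".toList],           "reports"),
   (["routes".toList, "report_27".toList],           "reports"),
   (["routes".toList, "report_29".toList],           "reports"),
   (["routes".toList, "super_report".toList],        "reports"),
   (["routes".toList, "oru_analytics".toList],       "oru"),
   ([ "nlp_worker".toList],                          "oru"),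
   (["routes".toList, "hl7_orders_route".toList],    "hl7"),
   ([ "hl7_listener".toList],                        "hl7"),
   (["routes".toList, "bitnet_service".toList],      "ai"),
   (["routes".toList, "ai_teaching".toList],         "ai"),
   (["routes".toList, "financial_dashboard".toList], "financial"),
   (["routes".toList, "mapping_controller".toList],  "mapping"),
   (["routes".toList, "admin".toList],               "admin"),
   (["routes".toList, "user_management".toList],     "admin"),
   (["routes".toList, "activity_log".toList],        "admin"),
   (["routes".toList, "scheduling".toList],          "admin"),
   (["routes".toList, "hl7_forward".toList],         "admin"),
   (["routes".toList, "db_manager".toList],          "db_manager"),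
   (["routes".toList, "live_feed".toList],           "live_feed"),
   (["routes".toList, "portal".toList],              "portal"),
   (["routes".toList, "referring_intel".toList],     "referring_intel"),
   ([ "ETL_JOBS".toList],                            "etl"),
   ([ "auth".toList],                                "auth"),
   (["routes".toList, "report_cache".toList],        "app"),
   ([ "db".toList],                                  "app"),
   ([ "app".toList],                                 "app"),
   ([ "APP".toList],                                 "app"),
   ([ "config".toList],                              "app"),
   ([ "utils".toList],                               "app")]

-- tuple-keyed dict membership + indexing: first (unique) matching segment tuple
def pvTblGet (p : List (List Char)) (L : List (List (List Char) × String)) : Option String :=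
  match L with
  | [] => none
  | (k, v) :: t => if p == k then some v else pvTblGet p t

-- loop body over state (folder, path, seg): at '.' extend the path and look it up,
-- otherwise extend the current segment
def pvBStep (st : String × List (List Char) × List Char) (c : Char) :
    String × List (List Char) × List Char :=
  if c == '.' then
    let path := st.2.1 ++ [st.2.2]
    match pvTblGet path pvTbl with
    | some v => (v, path, [])
    | none   => (st.1, path, [])
  else (st.1, st.2.1, st.2.2 ++ [c])

def resolve_folder_py_alt (name : String) : String :=
  let st := name.toList.foldl pvBStep ("app", ([], []))
  let path := st.2.1 ++ [st.2.2]   -- final 'path += (seg,)'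
  match pvTblGet path pvTbl with
  | some v => v
  | none => st.1

-- ===== PRECONDITION & SPEC =====
def Spec_resolve_folder_py (name : String) (out : String) : Prop := out = resolve_folder_py_alt name
instance (name : String) (out : String) : Decidable (Spec_resolve_folder_py name out) := by unfold Spec_resolve_folder_py; infer_instance

-- ===== CLAIM (what is proved, stated in full; the proofs are below) =====
def Claim_equal_resolve_folder_py : Prop := ∀ (name : String), Dom_resolve_folder_py name → Spec_resolve_folder_py name (resolve_folder_py name)

-- ===== LEMMAS AND PROOFS =====

-- candidate.rsplit(".", 1)[0]: the characters before the LAST '.' (proof-layer helper)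
def pvParent (cs : List Char) : List Char := ((cs.reverse.dropWhile (· != '.')).drop 1).reverse

theorem pvParent_length_lt (cs : List Char) (h : '.' ∈ cs) : (pvParent cs).length < cs.length := by
  have hne : cs.reverse.dropWhile (· != '.') ≠ [] := by
    intro hnil
    have := List.dropWhile_eq_nil_iff.mp hnil ('.') (by simpa using h)
    simp at this
  have hlen : (cs.reverse.dropWhile (· != '.')).length ≤ cs.length := by
    simpa using List.length_dropWhile_le (· != '.') cs.reverse
  have hpos : 0 < (cs.reverse.dropWhile (· != '.')).length := List.length_pos_iff.mpr hne
  simp only [pvParent, List.length_reverse, List.length_drop]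
  omega

-- intermediate form: walk the name's dotted prefixes, longest first
def pvAltGo (cs : List Char) : String :=
  match pvGet cs pvMap with
  | some v => v
  | none =>
    if _h : PySem.Chars.isIn ['.'] cs then
      pvAltGo (pvParent cs)
    else "app"
termination_by cs.length
decreasing_by
  exact pvParent_length_lt cs ((List.singleton_infix_iff _ _).mp ((PySem.Chars.isIn_iff_infix _ _).mp _h))

-- A's condition on a key: name == prefix or name.startswith(prefix + ".")
def pvCond (cs k : List Char) : Bool := cs == k || PySem.Chars.startswith cs (k ++ ['.'])

theorem pvStep_eq (cs : List Char) (st : Int × String) (kv : List Char × String) :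
    pvStep cs st kv =
      if pvCond cs kv.1 && decide (st.1 < (kv.1.length : Int)) then ((kv.1.length : Int), kv.2) else st := rfl

-- a matching key is the name itself or strictly shorter
theorem pvCond_length (cs k : List Char) (h : pvCond cs k = true) :
    k = cs ∨ (k.length : Int) < (cs.length : Int) := by
  rcases Bool.or_eq_true_iff.mp h with h1 | h2
  · exact Or.inl (beq_iff_eq.mp h1).symm
  · have hp : k ++ ['.'] <+: cs := (PySem.Chars.startswith_iff _ _).mp h2
    have := hp.length_le
    simp at this
    right; omega

-- if '.' is not in the name, only the name itself can match
theorem pvCond_no_dot (cs k : List Char) (hd : '.' ∉ cs) (hk : (cs == k) = false) :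
    pvCond cs k = false := by
  unfold pvCond
  rw [hk]
  simp only [Bool.false_or]
  by_contra hsw
  have hp : k ++ ['.'] <+: cs := (PySem.Chars.startswith_iff _ _).mp (by simpa using hsw)
  exact hd (hp.mem (by simp))

-- the fold stays put when every matching key is no longer than best_len
theorem pvFold_stay (cs : List Char) (L : List (List Char × String)) (b : Int) (f : String)
    (h : ∀ kv ∈ L, pvCond cs kv.1 = true → (kv.1.length : Int) ≤ b) :
    L.foldl (pvStep cs) (b, f) = (b, f) := by
  induction L with
  | nil => rfl
  | cons kv t ih =>
    have hstep : pvStep cs (b, f) kv = (b, f) := by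
      rw [pvStep_eq]
      by_cases hc : pvCond cs kv.1 = true
      · have := h kv (by simp) hc
        simp [hc]
        omega
      · simp [Bool.eq_false_iff.mpr hc]
    simp only [List.foldl_cons, hstep]
    exact ih (fun kv' hkv' => h kv' (by simp [hkv']))

-- the fold only looks at the name through pvCond
theorem pvFold_congr (cs ps : List Char) (L : List (List Char × String)) (st : Int × String)
    (h : ∀ kv ∈ L, pvCond cs kv.1 = pvCond ps kv.1) :
    L.foldl (pvStep cs) st = L.foldl (pvStep ps) st := by
  induction L generalizing st with
  | nil => rfl
  | cons kv t ih =>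
    have hstep : pvStep cs st kv = pvStep ps st kv := by
      rw [pvStep_eq, pvStep_eq, h kv (by simp)]
    simp only [List.foldl_cons, hstep]
    exact ih _ (fun kv' hkv' => h kv' (by simp [hkv']))

-- pvGet cs = none means no key equals cs
theorem pvGet_none (cs : List Char) (L : List (List Char × String)) (h : pvGet cs L = none) :
    ∀ kv ∈ L, (cs == kv.1) = false := by
  induction L with
  | nil => simp
  | cons kv t ih =>
    intro kv' hkv'
    unfold pvGet at h
    by_cases he : (cs == kv.1) = true
    · simp [he] at h
    · rcases List.mem_cons.mp hkv' with rfl | hm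
      · exact Bool.eq_false_iff.mpr he
      · exact ih (by simpa [Bool.eq_false_iff.mpr he] using h) kv' hm

-- the membership fast path is redundant for A's scan: if ps is a key, the scan returns its value
theorem pvFold_fast (ps : List Char) (v : String) :
    ∀ (L : List (List Char × String)) (b : Int) (f : String),
      pvGet ps L = some v → b < (ps.length : Int) →
      (L.foldl (pvStep ps) (b, f)).2 = v := by
  intro L
  induction L with
  | nil => intro b f h _; simp [pvGet] at h
  | cons kv t ih =>
    intro b f h hb
    obtain ⟨k, w⟩ := kv
    by_cases he : (ps == k) = true
    · have hkps : k = ps := (beq_iff_eq.mp he).symm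
      have hv : w = v := by simpa [pvGet, he] using h
      have hbk : b < (k.length : Int) := by rw [hkps]; exact hb
      have hstep : pvStep ps (b, f) (k, w) = ((k.length : Int), w) := by
        rw [pvStep_eq]
        simp [pvCond, he, hbk]
      rw [List.foldl_cons, hstep, pvFold_stay ps t _ w ?_]
      · exact hv
      · intro kv' hkv' hc
        rcases pvCond_length ps kv'.1 hc with h1 | h1
        · simp [h1, hkps]
        · rw [hkps]; omega
    · have ht : pvGet ps t = some v := by simpa [pvGet, he] using h
      have hst : ∃ b' f', pvStep ps (b, f) (k, w) = (b', f') ∧ b' < (ps.length : Int) := by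
        rw [pvStep_eq]
        by_cases hc : pvCond ps k = true
        · rcases pvCond_length ps k hc with h1 | h1
          · exact absurd (beq_iff_eq.mpr h1.symm) he
          · by_cases hlt : b < (k.length : Int)
            · exact ⟨(k.length : Int), w, by simp [hc, hlt], h1⟩
            · exact ⟨b, f, by simp [hlt], hb⟩
        · exact ⟨b, f, by simp [Bool.eq_false_iff.mpr hc], hb⟩
      obtain ⟨b', f', hstep, hb'⟩ := hst
      rw [List.foldl_cons, hstep]
      exact ih b' f' ht hb'

-- decomposition at the last dot: cs = pvParent cs ++ '.' :: t with no dot in t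
theorem pvParent_decomp (cs : List Char) (h : '.' ∈ cs) :
    ∃ t, cs = pvParent cs ++ '.' :: t ∧ '.' ∉ t := by
  have hne : cs.reverse.dropWhile (· != '.') ≠ [] := by
    intro hnil
    have := List.dropWhile_eq_nil_iff.mp hnil ('.') (by simpa using h)
    simp at this
  have hsplit : cs.reverse.takeWhile (· != '.') ++ cs.reverse.dropWhile (· != '.') = cs.reverse :=
    List.takeWhile_append_dropWhile
  obtain ⟨a, rt, hrc⟩ := List.exists_cons_of_ne_nil hne
  have hhead : ((· != '.') ((cs.reverse.dropWhile (· != '.')).head hne)) = false :=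
    List.head_dropWhile_not (· != '.') hne
  have ha : a = '.' := by
    have : (cs.reverse.dropWhile (· != '.')).head hne = a := by simp [hrc]
    rw [this] at hhead
    simpa using hhead
  subst ha
  refine ⟨(cs.reverse.takeWhile (· != '.')).reverse, ?_, ?_⟩
  · have hcsr : cs = (cs.reverse.takeWhile (· != '.') ++ cs.reverse.dropWhile (· != '.')).reverse := by
      rw [hsplit, List.reverse_reverse]
    conv_lhs => rw [hcsr]
    rw [hrc]
    simp [pvParent, hrc, List.reverse_append]
  · intro hmem
    have := List.mem_takeWhile_imp (by simpa using hmem)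
    simp at this

-- pure list fact: dot-terminated prefixes of p ++ '.' :: t ('.' ∉ t) are p itself or dot-prefixes of p
theorem dot_prefix_iff (k p t : List Char) (ht : '.' ∉ t) :
    k ++ ['.'] <+: p ++ '.' :: t ↔ (p = k ∨ k ++ ['.'] <+: p) := by
  constructor
  · intro hpre
    have hwhole : k ++ ['.'] <+: (p ++ ['.']) ++ t := by simpa [List.append_assoc] using hpre
    by_cases hle : k.length ≤ p.length
    · have hpp : k ++ ['.'] <+: p ++ ['.'] :=
        List.prefix_of_prefix_length_le hwhole (List.prefix_append _ _) (by simp [hle])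
      rcases Nat.lt_or_eq_of_le hle with hlt | heq
      · right
        have hppre : p <+: (p ++ ['.']) ++ t := by
          simp [List.append_assoc]
        exact List.prefix_of_prefix_length_le hwhole hppre (by simp; omega)
      · left
        have heqq : k ++ ['.'] = p ++ ['.'] := hpp.eq_of_length_le (by simp [heq])
        exact ((List.append_inj' heqq rfl).1).symm
    · exfalso
      have hlenw : k.length + 1 ≤ p.length + 1 + t.length := by
        have := hwhole.length_le
        simp at this
        omega
      have hik := List.prefix_iff_getElem?.mp hwhole k.length (by simp)
      rw [List.getElem?_append_right (by simp; omega)] at hik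
      simp at hik
      exact ht (List.mem_of_getElem? hik)
  · intro hpre
    rcases hpre with rfl | hkp
    · exact ⟨t, by simp⟩
    · exact hkp.trans (List.prefix_append p ('.' :: t))

-- stripping the last segment preserves A's condition on keys other than the name itself
theorem pvCond_parent (cs k : List Char) (hd : '.' ∈ cs) (hk : (cs == k) = false) :
    pvCond cs k = pvCond (pvParent cs) k := by
  obtain ⟨t, hcs, ht⟩ := pvParent_decomp cs hd
  rw [Bool.eq_iff_iff]
  unfold pvCond
  rw [hk]
  simp only [Bool.false_or, Bool.or_eq_true, beq_iff_eq, PySem.Chars.startswith_iff]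
  conv_lhs => rw [hcs]
  exact dot_prefix_iff k (pvParent cs) t ht

-- A equals the prefix walk, by strong induction on the name's length
theorem pvMain : ∀ (n : Nat) (cs : List Char), cs.length = n →
    (match pvGet cs pvMap with | some v => v | none => pvScan cs) = pvAltGo cs := by
  intro n
  induction n using Nat.strong_induction_on with
  | _ n ih =>
    intro cs hcs
    unfold pvAltGo
    cases hg : pvGet cs pvMap with
    | some v => rfl
    | none =>
      simp only
      have hkeys := pvGet_none cs pvMap hg
      by_cases hd : '.' ∈ cs
      · rw [dif_pos ((PySem.Chars.isIn_iff_infix _ _).mpr ((List.singleton_infix_iff _ _).mpr hd))]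
        set p := pvParent cs with hp
        have hcong : pvScan cs = pvScan p := by
          unfold pvScan
          rw [pvFold_congr cs p pvMap (0, "app")
            (fun kv hkv => pvCond_parent cs kv.1 hd (hkeys kv hkv))]
        have hplen : p.length < n := hcs ▸ pvParent_length_lt cs hd
        have hihp := ih p.length hplen p rfl
        rw [hcong, ← hihp]
        cases hgp : pvGet p pvMap with
        | none => rfl
        | some w =>
          simp only
          have hpne : p ≠ [] := by
            intro h0
            rw [h0] at hgp
            have : pvGet ([] : List Char) pvMap = none := by decide
            simp [this] at hgp
          exact pvFold_fast p w pvMap 0 "app" hgp (by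
            have : 0 < p.length := List.length_pos_iff.mpr hpne
            exact_mod_cast this)
      · rw [dif_neg (fun hin => hd ((List.singleton_infix_iff _ _).mp ((PySem.Chars.isIn_iff_infix _ _).mp hin)))]
        unfold pvScan
        rw [pvFold_stay cs pvMap 0 "app" (fun kv hkv hc => by
          rw [pvCond_no_dot cs kv.1 hd (hkeys kv hkv)] at hc; cases hc)]

-- ===== the split/join layer connecting B's segment paths with A's dotted keys =====

-- name.split(".") as a pure recursion (proof layer)
def splitD : List Char → List (List Char)
  | [] => [[]]
  | c :: t =>
    if c = '.' then [] :: splitD t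
    else match splitD t with
         | [] => [[c]]
         | s :: r => (c :: s) :: r

-- ".".join
def joinDot : List (List Char) → List Char
  | [] => []
  | [s] => s
  | s :: r => s ++ '.' :: joinDot r

theorem splitD_ne_nil (cs : List Char) : splitD cs ≠ [] := by
  cases cs with
  | nil => simp [splitD]
  | cons c t =>
    unfold splitD
    split_ifs
    · simp
    · cases h : splitD t <;> simp

theorem joinDot_splitD (cs : List Char) : joinDot (splitD cs) = cs := by
  induction cs with
  | nil => rfl
  | cons c t ih =>
    unfold splitD
    split_ifs with hc
    · subst hc
      cases h : splitD t with
      | nil => exact absurd h (splitD_ne_nil t)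
      | cons s r =>
        rw [h] at ih
        simp [joinDot, ih]
    · cases h : splitD t with
      | nil => exact absurd h (splitD_ne_nil t)
      | cons s r =>
        rw [h] at ih
        cases r with
        | nil => simp [joinDot] at ih ⊢; exact ih
        | cons s' r' => simp [joinDot] at ih ⊢; simp [ih]

theorem splitD_dot_free (cs : List Char) : ∀ s ∈ splitD cs, '.' ∉ s := by
  induction cs with
  | nil => simp [splitD]
  | cons c t ih =>
    unfold splitD
    split_ifs with hc
    · intro s hs
      rcases List.mem_cons.mp hs with rfl | hm
      · simp
      · exact ih s hm
    · cases h : splitD t with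
      | nil => exact absurd h (splitD_ne_nil t)
      | cons s r =>
        intro s' hs'
        rcases List.mem_cons.mp hs' with rfl | hm
        · intro hmem
          rcases List.mem_cons.mp hmem with rfl | hm2
          · exact hc rfl
          · exact ih s (h ▸ List.mem_cons_self) hm2
        · exact ih s' (h ▸ List.mem_cons_of_mem s hm)

theorem splitD_no_dot (cs : List Char) (hd : '.' ∉ cs) : splitD cs = [cs] := by
  induction cs with
  | nil => rfl
  | cons c t ih =>
    have hct : '.' ∉ t := fun h => hd (List.mem_cons_of_mem c h)
    have hcc : c ≠ '.' := fun h => hd (h ▸ List.mem_cons_self)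
    unfold splitD
    rw [if_neg hcc, ih hct]

theorem splitD_append_dot (p t : List Char) (ht : '.' ∉ t) :
    splitD (p ++ '.' :: t) = splitD p ++ [t] := by
  induction p with
  | nil =>
    simp only [List.nil_append]
    unfold splitD
    rw [if_pos rfl, splitD_no_dot t ht]
    rfl
  | cons c p' ih =>
    simp only [List.cons_append]
    unfold splitD
    split_ifs with hc
    · rw [ih]; rfl
    · rw [ih]
      cases h : splitD p' with
      | nil => exact absurd h (splitD_ne_nil p')
      | cons s r => simp

-- appending a non-dot character extends the last segment
theorem splitD_append_char (cs : List Char) (c : Char) (hc : c ≠ '.') :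
    splitD (cs ++ [c]) = (splitD cs).dropLast ++ [((splitD cs).getLastD []) ++ [c]] := by
  induction cs with
  | nil => simp [splitD, hc]
  | cons a t ih =>
    simp only [List.cons_append]
    unfold splitD
    cases h : splitD t with
    | nil => exact absurd h (splitD_ne_nil t)
    | cons s r =>
      rw [h] at ih
      rw [ih]
      split_ifs with ha
      · cases r with
        | nil => simp
        | cons s' r' => simp
      · cases r with
        | nil => simp
        | cons s' r' => simp [List.dropLast]

-- splitting at the last dot: a ++ '.'::u = b ++ '.'::v with dot-free a b forces a = b
theorem dot_split_unique (a : List Char) : ∀ (b u v : List Char), '.' ∉ a → '.' ∉ b →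
    a ++ '.' :: u = b ++ '.' :: v → a = b ∧ u = v := by
  induction a with
  | nil =>
    intro b u v _ hb he
    cases b with
    | nil => simpa using he
    | cons x b' =>
      simp only [List.nil_append, List.cons_append, List.cons.injEq] at he
      exact absurd (he.1 ▸ List.mem_cons_self) hb
  | cons x a' ih =>
    intro b u v ha hb he
    cases b with
    | nil =>
      simp only [List.cons_append, List.nil_append, List.cons.injEq] at he
      exact absurd (he.1 ▸ List.mem_cons_self) ha
    | cons y b' =>
      simp only [List.cons_append, List.cons.injEq] at he
      obtain ⟨hxy, he'⟩ := he
      have := ih b' u v (fun h => ha (List.mem_cons_of_mem x h)) (fun h => hb (List.mem_cons_of_mem y h)) he'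
      exact ⟨by rw [hxy, this.1], this.2⟩

-- dot-joining is injective on nonempty lists of dot-free segments
theorem joinDot_inj (p : List (List Char)) : ∀ (k : List (List Char)), p ≠ [] → k ≠ [] →
    (∀ s ∈ p, '.' ∉ s) → (∀ s ∈ k, '.' ∉ s) → joinDot p = joinDot k → p = k := by
  induction p with
  | nil => intro k h; exact absurd rfl h
  | cons s p' ih =>
    intro k _ hk hp hkf he
    cases k with
    | nil => exact absurd rfl hk
    | cons w k' =>
      cases p' with
      | nil =>
        cases k' with
        | nil => simpa [joinDot] using he
        | cons w' k'' =>
          exfalso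
          simp only [joinDot] at he
          have : '.' ∈ s := by
            rw [he]
            exact List.mem_append_right w (List.mem_cons_self)
          exact hp s List.mem_cons_self this
      | cons s' p'' =>
        cases k' with
        | nil =>
          exfalso
          simp only [joinDot] at he
          have : '.' ∈ w := by
            rw [← he]
            exact List.mem_append_right s (List.mem_cons_self)
          exact hkf w List.mem_cons_self this
        | cons w' k'' =>
          simp only [joinDot] at he
          have hu := dot_split_unique s w (joinDot (s' :: p'')) (joinDot (w' :: k''))
            (hp s List.mem_cons_self) (hkf w List.mem_cons_self) he
          have := ih (w' :: k'') (by simp) (by simp)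
            (fun x hx => hp x (List.mem_cons_of_mem s hx))
            (fun x hx => hkf x (List.mem_cons_of_mem w hx)) hu.2
          rw [hu.1, this]

-- the two tables store the same entries (B's keys pre-split)
theorem pvMap_eq_join : pvMap = pvTbl.map (fun kv => (joinDot kv.1, kv.2)) := by decide

theorem pvTbl_keys_ok : ∀ kv ∈ pvTbl, kv.1 ≠ [] ∧ ∀ s ∈ kv.1, '.' ∉ s := by decide

-- lookup bridge: looking up the segment path IS looking up the dotted name
theorem pvGet_join (p : List (List Char)) (hne : p ≠ []) (hdf : ∀ s ∈ p, '.' ∉ s) :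
    ∀ (L : List (List (List Char) × String)), (∀ kv ∈ L, kv.1 ≠ [] ∧ ∀ s ∈ kv.1, '.' ∉ s) →
    pvGet (joinDot p) (L.map (fun kv => (joinDot kv.1, kv.2))) = pvTblGet p L := by
  intro L
  induction L with
  | nil => intro _; rfl
  | cons kv t ih =>
    intro hok
    obtain ⟨k, v⟩ := kv
    have hkok := hok (k, v) List.mem_cons_self
    have hbeq : (joinDot p == joinDot k) = (p == k) := by
      by_cases he : p = k
      · simp [he]
      · have hne2 : joinDot p ≠ joinDot k := fun hj =>
          he (joinDot_inj p k hne hkok.1 hdf hkok.2 hj)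
        simp [he, hne2]
    simp only [List.map_cons, pvGet, pvTblGet, hbeq]
    split_ifs <;> [rfl; exact ih (fun kv' h' => hok kv' (List.mem_cons_of_mem _ h'))]

-- last-hit over a list of candidate paths
def pvHit (acc : String) (path : List (List Char)) : String :=
  match pvTblGet path pvTbl with
  | some v => v
  | none => acc

def pvHits (paths : List (List (List Char))) : String := paths.foldl pvHit "app"

-- the folder accumulated by B's scan so far: last hit among the PROPER dotted prefixes
def pvStrict (cs : List Char) : String := pvHits ((splitD cs).dropLast.inits.tail)

-- nonempty inits decompose at the last element
theorem inits_tail_concat {α : Type} (l : List α) (hne : l ≠ []) :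
    l.inits.tail = l.dropLast.inits.tail ++ [l] := by
  obtain ⟨x, a, rfl⟩ := List.eq_nil_or_concat l |>.resolve_left hne
  simp only [List.concat_eq_append]
  rw [List.inits_append]
  simp only [List.dropLast_append_cons, List.dropLast_singleton, List.append_nil]
  have hne2 : x.inits ≠ [] := by
    intro h0
    have := congrArg List.length h0
    simp at this
  rw [List.tail_append_of_ne_nil hne2]
  simp

-- invariant of B's character fold
theorem pvFoldB_inv (cs : List Char) :
    cs.foldl pvBStep ("app", ([], [])) =
      (pvStrict cs, ((splitD cs).dropLast, (splitD cs).getLastD [])) := by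
  induction cs using List.reverseRecOn with
  | nil => rfl
  | append_singleton cs c ih =>
    rw [List.foldl_append, List.foldl_cons, List.foldl_nil, ih]
    have hrebuild : (splitD cs).dropLast ++ [(splitD cs).getLastD []] = splitD cs := by
      obtain ⟨x, a, hx⟩ := List.eq_nil_or_concat (splitD cs) |>.resolve_left (splitD_ne_nil cs)
      rw [hx]; simp
    by_cases hc : c = '.'
    · subst hc
      have hsp : splitD (cs ++ ['.']) = splitD cs ++ [[]] :=
        splitD_append_dot cs [] (by simp)
      have hstrict : pvStrict (cs ++ ['.']) = pvHit (pvStrict cs) (splitD cs) := by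
        unfold pvStrict
        rw [hsp]
        rw [List.dropLast_concat, inits_tail_concat (splitD cs) (splitD_ne_nil cs)]
        unfold pvHits
        rw [List.foldl_append, List.foldl_cons, List.foldl_nil]
      simp only [pvBStep, hrebuild, hsp, beq_self_eq_true, if_true]
      rw [List.dropLast_concat]
      unfold pvHit at hstrict
      cases hg : pvTblGet (splitD cs) pvTbl <;> rw [hg] at hstrict <;> simp [hstrict]
    · have hsp := splitD_append_char cs c hc
      have hstrict : pvStrict (cs ++ [c]) = pvStrict cs := by
        unfold pvStrict
        rw [hsp, List.dropLast_concat]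
      simp only [pvBStep, beq_iff_eq, if_neg hc]
      rw [hstrict, hsp, List.dropLast_concat]
      simp

-- B computes the last hit over all dotted prefixes (proper ones, then the full name)
theorem pvAlt_eq (name : String) :
    resolve_folder_py_alt name = pvHit (pvStrict name.toList) (splitD name.toList) := by
  unfold resolve_folder_py_alt
  rw [pvFoldB_inv]
  have hrebuild : (splitD name.toList).dropLast ++ [(splitD name.toList).getLastD []] = splitD name.toList := by
    obtain ⟨x, a, hx⟩ := List.eq_nil_or_concat (splitD name.toList) |>.resolve_left (splitD_ne_nil name.toList)
    rw [hx]; simp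
  simp only [hrebuild]
  rfl

-- full-path lookup = A's dict lookup of the name
theorem pvTblGet_splitD (cs : List Char) :
    pvTblGet (splitD cs) pvTbl = pvGet cs pvMap := by
  conv_rhs => rw [pvMap_eq_join, ← joinDot_splitD cs]
  exact (pvGet_join (splitD cs) (splitD_ne_nil cs) (splitD_dot_free cs) pvTbl pvTbl_keys_ok).symm

-- the prefix walk equals B's last-hit, by strong induction on the name's length
theorem pvAltGo_eq_hits : ∀ (n : Nat) (cs : List Char), cs.length = n →
    pvAltGo cs = pvHit (pvStrict cs) (splitD cs) := by
  intro n
  induction n using Nat.strong_induction_on with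
  | _ n ih =>
    intro cs hcs
    unfold pvAltGo pvHit
    rw [pvTblGet_splitD]
    cases hg : pvGet cs pvMap with
    | some v => rfl
    | none =>
      simp only
      by_cases hd : '.' ∈ cs
      · rw [dif_pos ((PySem.Chars.isIn_iff_infix _ _).mpr ((List.singleton_infix_iff _ _).mpr hd))]
        obtain ⟨t, hdec, ht⟩ := pvParent_decomp cs hd
        set p := pvParent cs with hp
        have hsp : splitD cs = splitD p ++ [t] := by rw [hdec]; exact splitD_append_dot p t ht
        have hstrict : pvStrict cs = pvHit (pvStrict p) (splitD p) := by
          unfold pvStrict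
          rw [hsp, List.dropLast_concat, inits_tail_concat (splitD p) (splitD_ne_nil p)]
          unfold pvHits
          rw [List.foldl_append, List.foldl_cons, List.foldl_nil]
        have hplen : p.length < n := hcs ▸ pvParent_length_lt cs hd
        rw [hstrict, ← ih p.length hplen p rfl]
      · rw [dif_neg (fun hin => hd ((List.singleton_infix_iff _ _).mp ((PySem.Chars.isIn_iff_infix _ _).mp hin)))]
        unfold pvStrict
        rw [splitD_no_dot cs hd]
        rfl

-- ===== VERDICT (by name: the statement is the Claim_ definition above) =====
theorem resolve_folder_py_spec : Claim_equal_resolve_folder_py := by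
  intro name _
  unfold Spec_resolve_folder_py
  rw [pvAlt_eq]
  rw [← pvAltGo_eq_hits name.toList.length name.toList rfl]
  exact pvMain name.toList.length name.toList rfl
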